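-- pv_equiv track=rewrite | github.com/gongyt1112/2023EE219_LAB | projects/lab4/tools/compile/Common.py | extract_inst
-- ===== SOURCE A (Python) =====
-- def extract_inst(instruction):
--     instruction = instruction.replace(",", " ").replace("\t", " ").replace("\n", " ")
--     list_tmp = instruction.split(" ")
--     list_inst = []
--     for i in list_tmp:
--         if(i != ''):
--             list_inst.append(i)
--     return list_inst
-- ===== SOURCE B (Python) =====
-- def extract_inst(instruction):
--     tokens = []
--     current = ""
--     for ch in instruction:
--         if ch in ", \t\n":
--             if current:
--                 tokens.append(current)
--                 current = ""
--         else: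
--             current += ch
--     if current:
--         tokens.append(current)
--     return tokens
-- ===== Notes on version B (the rewrite author's own statement) =====
-- stated objective: simpler
-- what changed: Replaced the three replace passes plus split-and-filter with a single character scan that flushes a buffer at each delimiter (only ',', ' ', tab, newline; CR is kept, as in A).
import Mathlib
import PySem

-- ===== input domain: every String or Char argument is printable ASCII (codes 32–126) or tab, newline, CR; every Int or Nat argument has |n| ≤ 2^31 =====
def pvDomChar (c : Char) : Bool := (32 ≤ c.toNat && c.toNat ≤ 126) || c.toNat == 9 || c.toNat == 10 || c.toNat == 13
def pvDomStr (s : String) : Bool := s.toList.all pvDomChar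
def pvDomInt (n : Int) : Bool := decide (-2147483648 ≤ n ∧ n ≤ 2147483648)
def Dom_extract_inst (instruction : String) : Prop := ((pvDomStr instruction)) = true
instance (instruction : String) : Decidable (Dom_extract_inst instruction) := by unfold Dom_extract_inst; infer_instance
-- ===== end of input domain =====

-- B replaces A's three replace passes + split-and-filter with one character scan flushing a buffer at each delimiter (',', ' ', tab, newline; CR is not a delimiter, as in A); objective: simpler.


-- ===== PORT A =====
def extract_inst (instruction : String) : List String :=
  let instruction := PySem.Str.replace (PySem.Str.replace (PySem.Str.replace instruction "," " ") "\t" " ") "\n" " "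
  let list_tmp := (PySem.Str.split? instruction " ").getD []
  list_tmp.foldl (fun list_inst i => if i ≠ "" then list_inst ++ [i] else list_inst) []

-- ===== PORT B =====
-- single pass over the characters, `current` is the buffer flushed at each delimiter
def scanTokens : List Char → List Char → List (List Char)
  | [], current => if current = [] then [] else [current]
  | c :: rest, current =>
    if c = ',' ∨ c = ' ' ∨ c = '\t' ∨ c = '\n' then
      (if current = [] then [] else [current]) ++ scanTokens rest []
    else scanTokens rest (current ++ [c])

def extract_inst_alt (instruction : String) : List String :=
  (scanTokens instruction.toList []).map String.ofList

-- ===== PRECONDITION & SPEC =====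
def Spec_extract_inst (instruction : String) (out : List String) : Prop := out = extract_inst_alt instruction
instance (instruction : String) (out : List String) : Decidable (Spec_extract_inst instruction out) := by unfold Spec_extract_inst; infer_instance

-- ===== CLAIM (what is proved, stated in full; the proofs are below) =====
def Claim_equal_extract_inst : Prop := ∀ (instruction : String), Dom_extract_inst instruction → Spec_extract_inst instruction (extract_inst instruction)

-- ===== LEMMAS AND PROOFS =====

/-- the combined effect of A's three single-character replaces -/
def gmap (c : Char) : Char := if c = ',' ∨ c = '\t' ∨ c = '\n' then ' ' else c

lemma replace_go_single (o : Char) : ∀ (fuel : Nat) (l acc : List Char), l.length ≤ fuel →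
    PySem.Chars.replace.go [o] [' '] fuel l acc
      = acc.reverse ++ l.map (fun c => if c = o then ' ' else c) := by
  intro fuel
  induction fuel with
  | zero =>
    intro l acc h
    have : l = [] := List.eq_nil_of_length_eq_zero (Nat.le_zero.mp h)
    subst this
    simp [PySem.Chars.replace.go]
  | succ n ih =>
    intro l acc h
    cases l with
    | nil => simp [PySem.Chars.replace.go]
    | cons c t =>
      simp only [PySem.Chars.replace.go, List.isPrefixOf, Bool.and_true]
      by_cases hc : c = o
      · subst hc
        simp only [BEq.rfl, if_pos]
        rw [ih _ _ (by simpa using Nat.le_of_succ_le_succ h)]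
        simp
      · have : (o == c) = false := beq_eq_false_iff_ne.mpr (Ne.symm hc)
        rw [this]
        simp only [Bool.false_eq_true]
        rw [if_neg (fun h => h)]
        rw [ih _ _ (by simpa using Nat.le_of_succ_le_succ h)]
        simp [hc]

lemma replace_single (s : List Char) (o : Char) :
    PySem.Chars.replace s [o] [' '] = s.map (fun c => if c = o then ' ' else c) := by
  rw [PySem.Chars.replace, if_neg (fun hh => nomatch hh)]
  simpa using replace_go_single o s.length s []

lemma splitOn_go_filter : ∀ (fuel : Nat) (l cur : List Char) (acc : List (List Char)),
    l.length < fuel →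
    (∀ c ∈ l, c ≠ ',' ∧ c ≠ '\t' ∧ c ≠ '\n') →
    (PySem.Chars.splitOn.go [' '] fuel l cur acc).filter (fun p => !p.isEmpty)
      = (acc.filter (fun p => !p.isEmpty)).reverse ++ scanTokens l cur.reverse := by
  intro fuel
  induction fuel with
  | zero => intro l cur acc h _; omega
  | succ n ih =>
    intro l cur acc h hno
    cases l with
    | nil =>
      simp only [PySem.Chars.splitOn.go, scanTokens]
      by_cases hc : cur.reverse = []
      · simp [hc, List.filter_reverse]
      · have : cur.reverse.isEmpty = false := by simpa [List.isEmpty_iff] using hc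
        simp [hc, List.filter_reverse, this]
    | cons c t =>
      have hct := hno c (by simp)
      have hnot : ∀ c' ∈ t, c' ≠ ',' ∧ c' ≠ '\t' ∧ c' ≠ '\n' := fun c' hm => hno c' (by simp [hm])
      simp only [PySem.Chars.splitOn.go, List.isPrefixOf, Bool.and_true]
      by_cases hsp : c = ' '
      · subst hsp
        simp only [BEq.rfl, if_pos]
        have hdrop : List.drop [' '].length (' ' :: t) = t := rfl
        rw [hdrop, ih _ _ _ (by simpa using Nat.lt_of_succ_lt_succ h) hnot]
        simp only [scanTokens, if_pos (by simp : (' ' = ',' ∨ ' ' = ' ' ∨ ' ' = '\t' ∨ ' ' = '\n'))]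
        by_cases hcur : cur.reverse = []
        · simp [hcur, List.filter_reverse]
        · have : cur.reverse.isEmpty = false := by simpa [List.isEmpty_iff] using hcur
          simp [hcur, List.filter_reverse, this]
      · have : (' ' == c) = false := beq_eq_false_iff_ne.mpr (fun e => hsp e.symm)
        rw [this]
        simp only [Bool.false_eq_true]
        rw [if_neg (fun hh => hh)]
        rw [ih _ _ _ (by simpa using Nat.lt_of_succ_lt_succ h) hnot]
        have hnd : ¬ (c = ',' ∨ c = ' ' ∨ c = '\t' ∨ c = '\n') := by
          rintro (h1 | h1 | h1 | h1)
          · exact hct.1 h1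
          · exact hsp h1
          · exact hct.2.1 h1
          · exact hct.2.2 h1
        simp [scanTokens, hnd]

lemma scanTokens_map_gmap : ∀ (s cur : List Char), scanTokens (s.map gmap) cur = scanTokens s cur := by
  intro s
  induction s with
  | nil => intro cur; rfl
  | cons c t ih =>
    intro cur
    by_cases hd : c = ',' ∨ c = ' ' ∨ c = '\t' ∨ c = '\n'
    · have hg : gmap c = ' ' := by
        rcases hd with h | h | h | h <;> simp [gmap, h]
      simp [scanTokens, hg, hd, ih]
    · have hg : gmap c = c := by
        push Not at hd
        simp [gmap, hd.1, hd.2.2.1, hd.2.2.2]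
      simp [scanTokens, hg, hd, ih]

lemma gmap_comp (c : Char) :
    (if (if (if c = ',' then ' ' else c) = '\t' then ' ' else if c = ',' then ' ' else c) = '\n'
      then ' ' else if (if c = ',' then ' ' else c) = '\t' then ' ' else if c = ',' then ' ' else c)
    = gmap c := by
  by_cases h1 : c = ','
  · simp [h1, gmap]
  · by_cases h2 : c = '\t'
    · simp [h1, h2, gmap]
    · by_cases h3 : c = '\n'
      · simp [h1, h2, h3, gmap]
      · simp [h1, h2, h3, gmap]

lemma decide_ne_empty (s : String) : (decide (s ≠ "")) = !s.toList.isEmpty := by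
  by_cases h : s = ""
  · subst h; simp
  · have hne : s.toList ≠ [] := by
      intro e
      apply h
      have h2 : String.ofList s.toList = s := String.ofList_toList
      rw [e] at h2
      exact h2.symm
    simp [h, List.isEmpty_iff, hne]

-- ===== VERDICT (by name: the statement is the Claim_ definition above) =====
theorem extract_inst_spec : Claim_equal_extract_inst := by
  intro instruction _
  unfold Spec_extract_inst extract_inst extract_inst_alt
  set s := PySem.Str.replace (PySem.Str.replace (PySem.Str.replace instruction "," " ") "\t" " ") "\n" " " with hs
  show List.foldl (fun list_inst i => if i ≠ "" then list_inst ++ [i] else list_inst) []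
      ((PySem.Str.split? s " ").getD []) = List.map String.ofList (scanTokens instruction.toList [])
  have hslist : s.toList = instruction.toList.map gmap := by
    rw [hs]
    rw [PySem.Str.toList_replace, PySem.Str.toList_replace, PySem.Str.toList_replace]
    show PySem.Chars.replace (PySem.Chars.replace (PySem.Chars.replace instruction.toList [','] [' ']) ['\t'] [' ']) ['\n'] [' '] = _
    rw [replace_single, replace_single, replace_single]
    simp only [List.map_map]
    apply List.map_congr_left
    intro c _
    exact gmap_comp c
  -- split? with a nonempty separator returns some (splitOn …)
  have hsplit := PySem.Str.split?_map s " "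
  have hchars : PySem.Chars.split? s.toList (" ").toList = some (PySem.Chars.splitOn s.toList [' ']) := by
    show PySem.Chars.split? s.toList [' '] = _
    rw [PySem.Chars.split?, if_neg (by decide)]
  rw [hchars] at hsplit
  cases htmp : PySem.Str.split? s " " with
  | none => rw [htmp] at hsplit; simp at hsplit
  | some tmp =>
    rw [htmp] at hsplit
    simp only [Option.map_some, Option.some.injEq] at hsplit
    simp only [Option.getD_some]
    -- the filtering loop
    have hfun : (fun (list_inst : List String) (i : String) => if i ≠ "" then list_inst ++ [i] else list_inst)
        = (fun acc x => if (fun (i : String) => decide (i ≠ "")) x = true then acc ++ [id x] else acc) := by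
      funext acc x
      by_cases hx : x = "" <;> simp [hx]
    rw [hfun, PySem.List.foldl_append_if (fun (i : String) => decide (i ≠ "")) id tmp [], List.map_id, List.nil_append]
    -- move to the character level
    have hkey : (tmp.filter (fun i => decide (i ≠ ""))).map String.toList
        = scanTokens instruction.toList [] := by
      have : (fun (i : String) => decide (i ≠ "")) = (fun (x : List Char) => !x.isEmpty) ∘ String.toList := by
        funext i; exact decide_ne_empty i
      rw [this, ← List.filter_map, hsplit, hslist]
      have hlen : (instruction.toList.map gmap).length < instruction.toList.length + 1 := by simp
      have hnog : ∀ c ∈ instruction.toList.map gmap, c ≠ ',' ∧ c ≠ '\t' ∧ c ≠ '\n' := by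
        intro c hm
        rcases List.mem_map.mp hm with ⟨c0, -, rfl⟩
        unfold gmap
        by_cases hd : c0 = ',' ∨ c0 = '\t' ∨ c0 = '\n'
        · simp [hd]
        · push Not at hd
          simp [hd.1, hd.2.1, hd.2.2]
      have := splitOn_go_filter (instruction.toList.length + 1) (instruction.toList.map gmap) [] [] hlen hnog
      simp only [List.filter_nil, List.reverse_nil, List.nil_append] at this
      have hlen2 : (instruction.toList.map gmap).length + 1 = instruction.toList.length + 1 := by simp
      rw [PySem.Chars.splitOn, hlen2, this]
      exact scanTokens_map_gmap _ []
    calc tmp.filter (fun i => decide (i ≠ ""))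
        = ((tmp.filter (fun i => decide (i ≠ ""))).map String.toList).map String.ofList := by
          rw [List.map_map]
          conv_lhs => rw [← List.map_id (tmp.filter (fun i => decide (i ≠ "")))]
          apply List.map_congr_left
          intro x _
          exact String.ofList_toList.symm
      _ = (scanTokens instruction.toList []).map String.ofList := by rw [hkey]
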